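-- pv_equiv track=rewrite | github.com/TANG-guoguo/202304OURSW | Aggregation.py | Find_Bucket
-- ===== SOURCE A (Python) =====
-- def Find_Bucket(K, data, Bound):  # 找data位于哪个桶
--     result = 0
--     # 每个桶 桶号k∈0~K-1
--     right = K
--     left = 0
--     if data >= Bound[-1]:
--         return K - 1
--     while left <= right:  # 二分查找
--         middle = (left + right) // 2
--         if Bound[middle] <= data < Bound[middle + 1]:
--             result = middle
--             break
--         elif Bound[middle + 1] <= data:
--             left = middle + 1
--         else:
--             right = middle - 1
--     return result
-- ===== SOURCE B (Python) =====
-- def Find_Bucket(K, data, Bound):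
--     if data >= Bound[-1]:
--         return K - 1
--     for k in range(K):
--         if Bound[k] <= data < Bound[k + 1]:
--             return k
--     return 0
-- ===== Notes on version B (the rewrite author's own statement) =====
-- stated objective: simpler
-- what changed: Replaced the hand-written binary search with a single sequential scan over the bucket indices (same top-bucket guard and default 0), returning the first k with Bound[k] <= data < Bound[k+1].
-- outside the precondition, e.g. on Find_Bucket(3, 3, [0, 5, 1, 10]): A returns 2, B returns 0; on Find_Bucket(1, 7, [0, 5, 10]): A returns 1, B returns 0
import Mathlib
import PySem

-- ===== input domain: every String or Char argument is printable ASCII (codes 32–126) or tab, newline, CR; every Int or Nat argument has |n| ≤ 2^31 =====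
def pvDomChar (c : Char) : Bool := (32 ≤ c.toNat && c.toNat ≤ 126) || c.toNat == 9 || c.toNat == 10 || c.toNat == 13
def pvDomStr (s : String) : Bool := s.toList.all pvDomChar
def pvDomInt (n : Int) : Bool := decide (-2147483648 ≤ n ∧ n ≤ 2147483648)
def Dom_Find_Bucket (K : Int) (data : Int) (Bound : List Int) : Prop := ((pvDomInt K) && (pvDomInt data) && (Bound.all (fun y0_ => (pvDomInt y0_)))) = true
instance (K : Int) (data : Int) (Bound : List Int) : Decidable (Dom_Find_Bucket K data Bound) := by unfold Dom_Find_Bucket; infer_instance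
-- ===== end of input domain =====

-- B replaces A's hand-written binary search by a plain first-match sequential scan over the
-- bucket indices (objective: simpler). Pre_ restricts to the cases listed above its definition.


-- ===== PORT A =====
-- A's while-loop binary search, as recursion on the shrinking interval [left, right].
def FB_loop (data : Int) (Bound : List Int) (left right : Int) : Int :=
  if h : left ≤ right then
    match PySem.List.pyGet? Bound (PySem.Int.floordiv (left + right) 2),
          PySem.List.pyGet? Bound (PySem.Int.floordiv (left + right) 2 + 1) with
    | some bm, some bm1 =>
      if bm ≤ data ∧ data < bm1 then PySem.Int.floordiv (left + right) 2
      else if bm1 ≤ data then FB_loop data Bound (PySem.Int.floordiv (left + right) 2 + 1) right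
      else FB_loop data Bound left (PySem.Int.floordiv (left + right) 2 - 1)
    | _, _ => 0  -- Python raises IndexError here; such inputs are outside Pre_
  else 0
termination_by (right + 1 - left).toNat
decreasing_by
  · have := PySem.Int.floordiv_two_mid_bounds h; omega
  · have := PySem.Int.floordiv_two_mid_bounds h; omega

def Find_Bucket (K : Int) (data : Int) (Bound : List Int) : Int :=
  match PySem.List.pyGet? Bound (-1) with
  | none => 0  -- Bound[-1] raises IndexError on []; outside Pre_
  | some last => if last ≤ data then K - 1 else FB_loop data Bound 0 K

-- ===== PORT B =====
-- B's for-loop: return the first k in range(K) with Bound[k] <= data < Bound[k+1], else 0.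
def FB_scan (data : Int) (Bound : List Int) : List Int → Int
  | [] => 0
  | k :: ks =>
    match PySem.List.pyGet? Bound k, PySem.List.pyGet? Bound (k + 1) with
    | some bk, some bk1 => if bk ≤ data ∧ data < bk1 then k else FB_scan data Bound ks
    | _, _ => 0  -- Python raises IndexError here; such inputs are outside Pre_

def Find_Bucket_alt (K : Int) (data : Int) (Bound : List Int) : Int :=
  match PySem.List.pyGet? Bound (-1) with
  | none => 0  -- Bound[-1] raises IndexError on []; outside Pre_
  | some last => if last ≤ data then K - 1 else FB_scan data Bound (PySem.List.pyRange 0 K 1)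

-- ===== PRECONDITION & SPEC =====
-- Pre_ admits nonempty Bound in the cases where A's answer is well defined: the top-bucket
-- guard fires, K < 0 (the loop never runs), K = 0 with at least two boundaries, data below
-- every boundary, or the intended usage — a nondecreasing list of exactly K+1 boundaries.
-- It excludes inputs where A raises IndexError (empty/too-short Bound) and the remaining
-- unsorted/mis-sized inputs, on which A returns a bucket picked by the accident of bisection
-- order — a defensible-corner artefact B does not reproduce.
def Pre_Find_Bucket (K : Int) (data : Int) (Bound : List Int) : Prop :=
  Bound ≠ [] ∧
  (Bound.getD (Bound.length - 1) 0 ≤ data ∨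
    (data < Bound.getD (Bound.length - 1) 0 ∧
      (K < 0 ∨
       (K = 0 ∧ 2 ≤ Bound.length) ∨
       (1 ≤ K ∧ K + 1 ≤ (Bound.length : Int) ∧ ∀ x ∈ Bound, data < x) ∨
       (1 ≤ K ∧ (Bound.length : Int) = K + 1 ∧ Bound.Pairwise (· ≤ ·)))))
instance (K : Int) (data : Int) (Bound : List Int) : Decidable (Pre_Find_Bucket K data Bound) := by
  unfold Pre_Find_Bucket; infer_instance

def pvWitness_Find_Bucket : Int × Int × List Int := (2, 3, [0, 2, 5])

def Spec_Find_Bucket (K : Int) (data : Int) (Bound : List Int) (out : Int) : Prop := out = Find_Bucket_alt K data Bound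
instance (K : Int) (data : Int) (Bound : List Int) (out : Int) : Decidable (Spec_Find_Bucket K data Bound out) := by unfold Spec_Find_Bucket; infer_instance

-- ===== CLAIM (what is proved, stated in full; the proofs are below) =====
def Claim_equal_Find_Bucket : Prop := ∀ (K : Int) (data : Int) (Bound : List Int), Dom_Find_Bucket K data Bound → Pre_Find_Bucket K data Bound → Spec_Find_Bucket K data Bound (Find_Bucket K data Bound)

-- ===== LEMMAS AND PROOFS =====

-- monotonicity of a nondecreasing list, in getD form
theorem fb_mono {Bound : List Int} (hs : Bound.Pairwise (· ≤ ·)) {i j : Nat}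
    (hij : i ≤ j) (hj : j < Bound.length) : Bound.getD i 0 ≤ Bound.getD j 0 := by
  rcases Nat.lt_or_ge i j with hlt | hge
  · have := (List.pairwise_iff_getElem.mp hs) i j (by omega) hj hlt
    rwa [List.getD_eq_getElem _ _ (by omega), List.getD_eq_getElem _ _ hj]
  · have : i = j := by omega
    subst this; exact le_refl _

theorem fb_get {Bound : List Int} {i : Int} (h0 : 0 ≤ i) (h1 : i < (Bound.length : Int)) :
    PySem.List.pyGet? Bound i = some (Bound.getD i.toNat 0) := by
  rw [PySem.List.pyGet?_eq_some_getElem Bound h0 h1, List.getD_eq_getElem _ _ (by omega)]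

-- A's loop returns 0 when data lies below every boundary (left stays 0, no branch matches)
theorem fb_loop_none {K data : Int} {Bound : List Int} (hK : 1 ≤ K)
    (hKlen : K + 1 ≤ (Bound.length : Int))
    (hall : ∀ i : Nat, i < Bound.length → data < Bound.getD i 0)
    (right : Int) (hr : right ≤ K) :
    FB_loop data Bound 0 right = 0 := by
  by_cases h : (0 : Int) ≤ right
  · have hmid := PySem.Int.floordiv_two_mid_bounds (lo := 0) (hi := right) h
    have hdm := PySem.Int.floordiv_mul_add_mod (0 + right) 2
    have h0m := PySem.Int.mod_nonneg (0 + right) (b := 2) (by norm_num)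
    have h1m := PySem.Int.mod_lt (0 + right) (b := 2) (by norm_num)
    set m := PySem.Int.floordiv (0 + right) 2 with hm
    have hmK : m + 1 ≤ K := by omega
    have hdm2 : data < Bound.getD m.toNat 0 := hall _ (by omega)
    have hdm3 : data < Bound.getD (m + 1).toNat 0 := hall _ (by omega)
    rw [FB_loop, dif_pos h, ← hm, fb_get (by omega) (by omega), fb_get (by omega) (by omega)]
    dsimp only
    rw [if_neg (fun hc => absurd hc.1 (not_le.mpr hdm2)), if_neg (not_le.mpr hdm3)]
    exact fb_loop_none hK hKlen hall (m - 1) (by omega)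
  · rw [FB_loop, dif_neg h]
termination_by (right + 1).toNat
decreasing_by omega

-- A's loop returns k* when Bound[k*] ≤ data < Bound[k*+1] and k* ∈ [left, right]
theorem fb_loop_finds {K data : Int} {Bound : List Int} (hK : 1 ≤ K)
    (hlen : (Bound.length : Int) = K + 1) (hs : Bound.Pairwise (· ≤ ·))
    {k : Int} (hk0 : 0 ≤ k) (hkK : k < K)
    (hm1 : Bound.getD k.toNat 0 ≤ data) (hm2 : data < Bound.getD (k.toNat + 1) 0)
    (left right : Int) (hl0 : 0 ≤ left) (hl : left ≤ k) (hr : k ≤ right) (hrK : right ≤ K) :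
    FB_loop data Bound left right = k := by
  have h : left ≤ right := le_trans hl hr
  have hmid := PySem.Int.floordiv_two_mid_bounds (lo := left) (hi := right) h
  have hdm := PySem.Int.floordiv_mul_add_mod (left + right) 2
  have h0m := PySem.Int.mod_nonneg (left + right) (b := 2) (by norm_num)
  have h1m := PySem.Int.mod_lt (left + right) (b := 2) (by norm_num)
  set m := PySem.Int.floordiv (left + right) 2 with hm
  have hmK : m + 1 ≤ K := by omega
  rw [FB_loop, dif_pos h, ← hm, fb_get (by omega) (by omega), fb_get (by omega) (by omega)]
  dsimp only
  by_cases hc1 : Bound.getD m.toNat 0 ≤ data ∧ data < Bound.getD (m + 1).toNat 0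
  · rw [if_pos hc1]
    by_contra hne
    rcases lt_or_gt_of_ne hne with hlt | hgt
    · have h1 : Bound.getD (m + 1).toNat 0 ≤ Bound.getD k.toNat 0 :=
        fb_mono hs (by omega) (by omega)
      omega
    · have h2 : Bound.getD (k.toNat + 1) 0 ≤ Bound.getD m.toNat 0 :=
        fb_mono hs (by omega) (by omega)
      omega
  · rw [if_neg hc1]
    by_cases hc2 : Bound.getD (m + 1).toNat 0 ≤ data
    · rw [if_pos hc2]
      have hk2 : m + 1 ≤ k := by
        by_contra hx
        have h3 : Bound.getD (k.toNat + 1) 0 ≤ Bound.getD (m + 1).toNat 0 :=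
          fb_mono hs (by omega) (by omega)
        omega
      exact fb_loop_finds hK hlen hs hk0 hkK hm1 hm2 (m + 1) right (by omega) hk2 hr hrK
    · rw [if_neg hc2]
      have hdm2 : data < Bound.getD m.toNat 0 := by
        by_contra hx
        exact hc1 ⟨by omega, by omega⟩
      have hk2 : k ≤ m - 1 := by
        by_contra hx
        have h4 : Bound.getD m.toNat 0 ≤ Bound.getD k.toNat 0 :=
          fb_mono hs (by omega) (by omega)
        omega
      exact fb_loop_finds hK hlen hs hk0 hkK hm1 hm2 left (m - 1) hl0 hl hk2 (by omega)
termination_by (right + 1 - left).toNat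
decreasing_by all_goals omega

-- B's scan returns 0 when data lies below every boundary
theorem fb_scan_none {K data : Int} {Bound : List Int}
    (hKlen : K + 1 ≤ (Bound.length : Int))
    (hall : ∀ i : Nat, i < Bound.length → data < Bound.getD i 0)
    (a : Int) (h0 : 0 ≤ a) :
    FB_scan data Bound (PySem.List.pyRange a K 1) = 0 := by
  by_cases h : a < K
  · rw [PySem.List.pyRange_one_cons h, FB_scan,
        fb_get (by omega) (by omega), fb_get (by omega) (by omega)]
    dsimp only
    have h2 : data < Bound.getD a.toNat 0 := hall _ (by omega)
    rw [if_neg (fun hc => absurd hc.1 (by omega))]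
    exact fb_scan_none hKlen hall (a + 1) (by omega)
  · rw [PySem.List.pyRange_one_eq_nil (by omega), FB_scan]
termination_by (K - a).toNat
decreasing_by omega

-- B's scan returns k* when Bound[k*] ≤ data < Bound[k*+1] and a ≤ k*
theorem fb_scan_finds {K data : Int} {Bound : List Int} (hK : 1 ≤ K)
    (hlen : (Bound.length : Int) = K + 1) (hs : Bound.Pairwise (· ≤ ·))
    {k : Int} (hk0 : 0 ≤ k) (hkK : k < K)
    (hm1 : Bound.getD k.toNat 0 ≤ data) (hm2 : data < Bound.getD (k.toNat + 1) 0)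
    (a : Int) (h0 : 0 ≤ a) (ha : a ≤ k) :
    FB_scan data Bound (PySem.List.pyRange a K 1) = k := by
  have haK : a < K := by omega
  rw [PySem.List.pyRange_one_cons haK, FB_scan,
      fb_get (by omega) (by omega), fb_get (by omega) (by omega)]
  dsimp only
  have he : (a + 1).toNat = a.toNat + 1 := by omega
  rw [he]
  by_cases hak : a = k
  · subst hak
    rw [if_pos ⟨hm1, hm2⟩]
  · have hlt : a < k := by omega
    have h3 : Bound.getD (a.toNat + 1) 0 ≤ Bound.getD k.toNat 0 :=
      fb_mono hs (by omega) (by omega)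
    rw [if_neg (fun hc => by omega)]
    exact fb_scan_finds hK hlen hs hk0 hkK hm1 hm2 (a + 1) (by omega) (by omega)
termination_by (k - a).toNat
decreasing_by omega

-- ===== VERDICT (by name: the statement is the Claim_ definition above) =====
theorem Find_Bucket_spec : Claim_equal_Find_Bucket := by
  intro K data Bound _hdom hpre
  obtain ⟨hne, hrest⟩ := hpre
  unfold Spec_Find_Bucket Find_Bucket Find_Bucket_alt
  have hl0 : 0 < Bound.length := List.length_pos_of_ne_nil hne
  have hlast : PySem.List.pyGet? Bound (-1) = some (Bound.getD (Bound.length - 1) 0) := by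
    rw [PySem.List.pyGet?_neg_one, List.getLast?_eq_getElem?,
        List.getElem?_eq_getElem (by omega), List.getD_eq_getElem _ _ (by omega)]
  rw [hlast]
  dsimp only
  by_cases hge : Bound.getD (Bound.length - 1) 0 ≤ data
  · rw [if_pos hge, if_pos hge]
  · rw [if_neg hge, if_neg hge]
    rcases hrest with hguard | ⟨hlt, hcase⟩
    · exact absurd hguard hge
    rcases hcase with hKneg | ⟨hK0, hlen2⟩ | ⟨hK1, hKlen, hall⟩ | ⟨hK1, hlen, hs⟩
    · -- K < 0: the while loop never runs; range(K) is empty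
      rw [FB_loop, dif_neg (by omega), PySem.List.pyRange_one_eq_nil (by omega), FB_scan]
    · -- K = 0: the loop can only exit with result 0; range(0) is empty
      subst hK0
      rw [PySem.List.pyRange_one_eq_nil le_rfl, FB_scan, FB_loop, dif_pos le_rfl]
      have hz : PySem.Int.floordiv ((0 : Int) + 0) 2 = 0 := by decide
      rw [hz, fb_get (by omega) (by omega), fb_get (by omega) (by omega)]
      dsimp only
      split_ifs
      · rfl
      · rw [FB_loop, dif_neg (by omega)]
      · rw [FB_loop, dif_neg (by omega)]
    · -- data below every boundary: both return 0
      have hall' : ∀ i : Nat, i < Bound.length → data < Bound.getD i 0 := fun i hi => by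
        have hmem : Bound.getD i 0 ∈ Bound := by
          rw [List.getD_eq_getElem _ _ hi]; exact List.getElem_mem hi
        exact hall _ hmem
      rw [fb_loop_none hK1 hKlen hall' K le_rfl, fb_scan_none hKlen hall' 0 le_rfl]
    · -- intended usage: sorted list of K+1 boundaries
      have hKnat : Bound.length - 1 = K.toNat := by omega
      have hdlast : data < Bound.getD K.toNat 0 := by rw [← hKnat]; omega
      by_cases hnd : data < Bound.getD 0 0
      · have hall' : ∀ i : Nat, i < Bound.length → data < Bound.getD i 0 := fun i hi =>
          lt_of_lt_of_le hnd (fb_mono hs (Nat.zero_le _) hi)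
        rw [fb_loop_none hK1 (by omega) hall' K le_rfl, fb_scan_none (by omega) hall' 0 le_rfl]
      · rw [not_lt] at hnd
        have hex : ∃ j : Nat, data < Bound.getD j 0 ∧ j ≤ K.toNat := ⟨K.toNat, hdlast, le_refl _⟩
        have hj0 := Nat.find_spec hex
        have hmin : ∀ m, m < Nat.find hex → ¬(data < Bound.getD m 0 ∧ m ≤ K.toNat) :=
          fun m hm => Nat.find_min hex hm
        set j0 := Nat.find hex with hdef
        have hj0pos : 0 < j0 := by
          by_contra hx
          have hz : j0 = 0 := by omega
          rw [hz] at hj0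
          omega
        set k : Int := (j0 : Int) - 1 with hkdef
        have hk0 : (0 : Int) ≤ k := by omega
        have hkK : k < K := by omega
        have hkt : k.toNat = j0 - 1 := by omega
        have hm1 : Bound.getD k.toNat 0 ≤ data := by
          rw [hkt]
          by_contra hx
          exact hmin (j0 - 1) (by omega) ⟨by omega, by omega⟩
        have hm2 : data < Bound.getD (k.toNat + 1) 0 := by
          rw [hkt]
          have hj : j0 - 1 + 1 = j0 := by omega
          rw [hj]
          exact hj0.1
        rw [fb_loop_finds hK1 hlen hs hk0 hkK hm1 hm2 0 K le_rfl hk0 (by omega) le_rfl,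
            fb_scan_finds hK1 hlen hs hk0 hkK hm1 hm2 0 le_rfl hk0]
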